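-- pv_equiv track=rewrite | github.com/akshayayadav/protein-domain-evolution-project | scripts/calculate_species_level_domain_versatility_matrix.py | get_domain_adjacency_dict
-- ===== SOURCE A (Python) =====
-- def get_domain_adjacency_dict(dom_arr):
-- 	dom1_dom2_dict = {}
-- 	if(len(dom_arr)<2):
-- 		return(dom1_dom2_dict)
-- 	for i in range(0, len(dom_arr)):
-- 		if not (dom_arr[i] in dom1_dom2_dict):
-- 			dom1_dom2_dict[dom_arr[i]]={}
--
-- 		if(i==0):
-- 			#if(dom_arr[i] != dom_arr[i+1]):
-- 			dom1_dom2_dict[dom_arr[i]][dom_arr[i+1]]=1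
-- 		elif(i==len(dom_arr)-1):
-- 			#if(dom_arr[i] != dom_arr[i-1]):
-- 			dom1_dom2_dict[dom_arr[i]][dom_arr[i-1]]=1
-- 		else:
-- 			#if(dom_arr[i] != dom_arr[i+1]):
-- 			dom1_dom2_dict[dom_arr[i]][dom_arr[i+1]]=1
-- 			#if(dom_arr[i] != dom_arr[i-1]):
-- 			dom1_dom2_dict[dom_arr[i]][dom_arr[i-1]]=1
--
-- 	return(dom1_dom2_dict)
-- ===== SOURCE B (Python) =====
-- def get_domain_adjacency_dict(dom_arr):
-- 	# Inverted-index decomposition: first group the positions of each domain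
-- 	# into a positions index, then build the whole nested adjacency dict in one
-- 	# comprehension, deriving each domain's neighbours arithmetically from its
-- 	# positions with a uniform in-range filter (no i==0 / i==last branching).
-- 	n = len(dom_arr)
-- 	if n < 2:
-- 		return {}
-- 	pos = {}
-- 	for p in range(n):
-- 		pos.setdefault(dom_arr[p], []).append(p)
-- 	return {x: {dom_arr[j]: 1 for p in ps for j in (p + 1, p - 1) if 0 <= j < n}
-- 	        for x, ps in pos.items()}
-- ===== Notes on version B (the rewrite author's own statement) =====
-- stated objective: alternative
-- what changed: Replaces A's single indexed loop with i==0/i==last/middle branches mutating the nested dict by a staged inverted-index algorithm: one pass groups each domain's positions into an index, then a nested comprehension builds the adjacency dict per domain, deriving neighbours arithmetically from stored positions with a uniform in-range filter (no boundary branching).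
import Mathlib
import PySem

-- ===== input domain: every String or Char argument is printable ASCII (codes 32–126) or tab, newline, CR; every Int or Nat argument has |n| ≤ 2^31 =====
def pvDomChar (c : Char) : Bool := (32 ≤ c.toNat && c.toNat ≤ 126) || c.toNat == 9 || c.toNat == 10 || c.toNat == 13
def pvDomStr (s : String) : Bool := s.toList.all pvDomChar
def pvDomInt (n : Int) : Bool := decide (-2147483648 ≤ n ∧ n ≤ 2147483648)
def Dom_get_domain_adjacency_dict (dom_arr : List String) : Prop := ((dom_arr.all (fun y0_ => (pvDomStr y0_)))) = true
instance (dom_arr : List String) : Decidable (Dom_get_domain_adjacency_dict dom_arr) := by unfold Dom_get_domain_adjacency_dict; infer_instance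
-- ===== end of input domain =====

-- B replaces A's single indexed loop with boundary branches by an inverted-index algorithm
-- (group positions per domain, then build the nested dict per domain from stored positions
-- with a uniform in-range filter); same cost, proved to return the identical dict
-- (insertion order included).

-- ===== PORT A =====
-- loop body of A's 'for i in range(0, len(dom_arr))' (d[k][nb] = 1 is ported as Dict.modify
-- with default empty; exact here because the key was just ensured present)
def pvAbody (dom_arr : List String) (d : PySem.Dict String (PySem.Dict String Int)) (i : Int) :
    PySem.Dict String (PySem.Dict String Int) :=
  let key := PySem.List.pyGetD dom_arr i ""
  let d' := if d.contains key then d else d.insert key PySem.Dict.empty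
  if i = 0 then
    d'.modify key PySem.Dict.empty (fun inner => inner.insert (PySem.List.pyGetD dom_arr (i + 1) "") 1)
  else if i = (dom_arr.length : Int) - 1 then
    d'.modify key PySem.Dict.empty (fun inner => inner.insert (PySem.List.pyGetD dom_arr (i - 1) "") 1)
  else
    (d'.modify key PySem.Dict.empty (fun inner => inner.insert (PySem.List.pyGetD dom_arr (i + 1) "") 1)).modify
      key PySem.Dict.empty (fun inner => inner.insert (PySem.List.pyGetD dom_arr (i - 1) "") 1)

def get_domain_adjacency_dict (dom_arr : List String) : List (String × List (String × Int)) :=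
  if (dom_arr.length : Int) < 2 then []
  else
    ((PySem.List.pyRange 0 (dom_arr.length : Int) 1).foldl (pvAbody dom_arr)
        PySem.Dict.empty).items.map (fun p => (p.1, p.2.items))

-- ===== PORT B =====
-- candidate neighbour indices of position p: '(p + 1, p - 1) if 0 <= j < n', uniform filter
def pvEv (n p : Int) : List Int := [p + 1, p - 1].filter (fun j => decide (0 ≤ j ∧ j < n))

-- 'pos.setdefault(dom_arr[p], []).append(p)' is exactly Dict.modify with default []
def pvPosBody (dom_arr : List String) (d : PySem.Dict String (List Int)) (p : Int) :
    PySem.Dict String (List Int) :=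
  d.modify (PySem.List.pyGetD dom_arr p "") [] (fun l => l ++ [p])

-- inner comprehension '{dom_arr[j]: 1 for p in ps for j in (p+1, p-1) if 0 <= j < n}'
def pvInner (dom_arr : List String) (ps : List Int) : PySem.Dict String Int :=
  ps.foldl (fun inner p =>
      (pvEv (dom_arr.length : Int) p).foldl
        (fun inner j => inner.insert (PySem.List.pyGetD dom_arr j "") 1) inner)
    PySem.Dict.empty

def get_domain_adjacency_dict_alt (dom_arr : List String) : List (String × List (String × Int)) :=
  if (dom_arr.length : Int) < 2 then []
  else
    ((PySem.List.pyRange 0 (dom_arr.length : Int) 1).foldl (pvPosBody dom_arr)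
        PySem.Dict.empty).items.map (fun p => (p.1, (pvInner dom_arr p.2).items))

-- ===== PRECONDITION & SPEC =====
def Spec_get_domain_adjacency_dict (dom_arr : List String) (out : List (String × List (String × Int))) : Prop := out = get_domain_adjacency_dict_alt dom_arr
instance (dom_arr : List String) (out : List (String × List (String × Int))) : Decidable (Spec_get_domain_adjacency_dict dom_arr out) := by unfold Spec_get_domain_adjacency_dict; infer_instance

-- ===== CLAIM (what is proved, stated in full; the proofs are below) =====
def Claim_equal_get_domain_adjacency_dict : Prop := ∀ (dom_arr : List String), Dom_get_domain_adjacency_dict dom_arr → Spec_get_domain_adjacency_dict dom_arr (get_domain_adjacency_dict dom_arr)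

-- ===== LEMMAS AND PROOFS =====

-- neighbour NAMES of position p (what pvInner inserts for p), and the per-key abstraction
def pvEvStr (dom_arr : List String) (p : Int) : List String :=
  (pvEv (dom_arr.length : Int) p).map (fun j => PySem.List.pyGetD dom_arr j "")

-- from a position list to the inner {neighbour: 1} dict
def pvG (dom_arr : List String) (ps : List Int) : PySem.Dict String Int :=
  (ps.flatMap (pvEvStr dom_arr)).foldl (fun inner y => inner.insert y 1) PySem.Dict.empty

-- apply F to every value of a dict
def pvMapVals {β γ : Type} (F : β → γ) (d : PySem.Dict String β) : PySem.Dict String γ :=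
  PySem.Dict.mk (d.items.map (fun p => (p.1, F p.2)))

theorem pv_contains_mapVals {β γ : Type} (F : β → γ) (d : PySem.Dict String β) (k : String) :
    (pvMapVals F d).contains k = d.contains k := by
  simp only [pvMapVals, PySem.Dict.contains, List.any_map]
  rfl

theorem pv_get?_mapVals {β γ : Type} (F : β → γ) (d : PySem.Dict String β) (k : String) :
    (pvMapVals F d).get? k = (d.get? k).map F := by
  simp only [pvMapVals, PySem.Dict.get?, List.find?_map]
  have hpred : ((fun p : String × γ => p.1 == k) ∘ (fun p : String × β => (p.1, F p.2)))
      = (fun p : String × β => p.1 == k) := rfl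
  rw [hpred]
  cases List.find? (fun p => p.1 == k) d.items <;> rfl

theorem pv_getD_mapVals {β γ : Type} (F : β → γ) (d : PySem.Dict String β) (k : String) (d0 : β) :
    (pvMapVals F d).getD k (F d0) = F (d.getD k d0) := by
  rw [PySem.Dict.getD_eq_get?_getD, PySem.Dict.getD_eq_get?_getD, pv_get?_mapVals]
  cases d.get? k <;> rfl

-- pvMapVals commutes with a single dict insert
theorem pv_mapVals_insert {β γ : Type} (F : β → γ) (d : PySem.Dict String β) (k : String) (v : β) :
    pvMapVals F (d.insert k v) = (pvMapVals F d).insert k (F v) := by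
  apply PySem.Dict.ext
  cases hc : d.contains k with
  | true =>
    have hmc : (pvMapVals F d).contains k = true := by rw [pv_contains_mapVals]; exact hc
    show (d.insert k v).items.map (fun p => (p.1, F p.2)) = ((pvMapVals F d).insert k (F v)).items
    rw [PySem.Dict.items_insert_of_contains d v hc,
      PySem.Dict.items_insert_of_contains (pvMapVals F d) (F v) hmc]
    show (d.items.map (fun p => if (p.1 == k) = true then (k, v) else p)).map (fun p => (p.1, F p.2))
        = (d.items.map (fun p => (p.1, F p.2))).map (fun p => if (p.1 == k) = true then (k, F v) else p)
    rw [List.map_map, List.map_map]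
    apply List.map_congr_left
    intro p _
    by_cases hpk : p.1 = k <;> simp [Function.comp, hpk]
  | false =>
    have hmc : (pvMapVals F d).contains k = false := by rw [pv_contains_mapVals]; exact hc
    show (d.insert k v).items.map (fun p => (p.1, F p.2)) = ((pvMapVals F d).insert k (F v)).items
    rw [PySem.Dict.items_insert_of_not_contains d v hc,
      PySem.Dict.items_insert_of_not_contains (pvMapVals F d) (F v) hmc]
    show (d.items ++ [(k, v)]).map (fun p => (p.1, F p.2))
        = d.items.map (fun p => (p.1, F p.2)) ++ [(k, F v)]
    simp

-- pvMapVals commutes with modify when F intertwines the two updates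
theorem pv_mapVals_modify {β γ : Type} (F : β → γ) (d : PySem.Dict String β) (k : String)
    (d0 : β) (g : β → β) (g' : γ → γ) (h : ∀ v, F (g v) = g' (F v)) :
    pvMapVals F (d.modify k d0 g) = (pvMapVals F d).modify k (F d0) g' := by
  show pvMapVals F (d.insert k (g (d.getD k d0)))
      = (pvMapVals F d).insert k (g' ((pvMapVals F d).getD k (F d0)))
  rw [pv_mapVals_insert, h, pv_getD_mapVals]

-- A's 'ensure key present, then write' is plain modify
theorem pv_ensure_modify (d : PySem.Dict String (PySem.Dict String Int)) (k : String)
    (f : PySem.Dict String Int → PySem.Dict String Int) :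
    (if d.contains k then d else d.insert k PySem.Dict.empty).modify k PySem.Dict.empty f
      = d.modify k PySem.Dict.empty f := by
  cases hc : d.contains k with
  | true => simp
  | false =>
    simp only [Bool.false_eq_true, if_false]
    show (d.insert k PySem.Dict.empty).insert k
          (f ((d.insert k PySem.Dict.empty).getD k PySem.Dict.empty))
        = d.insert k (f (d.getD k PySem.Dict.empty))
    rw [PySem.Dict.insert_insert_self, PySem.Dict.getD_insert_self,
      PySem.Dict.getD_of_not_contains (h := hc)]

-- two writes at the same key compose
theorem pv_modify_modify (d : PySem.Dict String (PySem.Dict String Int)) (k : String)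
    (f g : PySem.Dict String Int → PySem.Dict String Int) :
    (d.modify k PySem.Dict.empty f).modify k PySem.Dict.empty g
      = d.modify k PySem.Dict.empty (fun v => g (f v)) := by
  show ((d.insert k (f (d.getD k PySem.Dict.empty))).insert k
        (g ((d.insert k (f (d.getD k PySem.Dict.empty))).getD k PySem.Dict.empty)))
      = d.insert k (g (f (d.getD k PySem.Dict.empty)))
  rw [PySem.Dict.insert_insert_self, PySem.Dict.getD_insert_self]

-- pvG absorbs one appended position as a fold over that position's neighbour names
theorem pv_G_append (dom_arr : List String) (ps : List Int) (p : Int) :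
    pvG dom_arr (ps ++ [p])
      = (pvEvStr dom_arr p).foldl (fun inner y => inner.insert y 1) (pvG dom_arr ps) := by
  simp [pvG, List.foldl_append]

-- the per-index step: A's branchy body simulates B's position-recording body through pvMapVals pvG
theorem pv_step (dom_arr : List String) (h2 : 2 ≤ dom_arr.length) (i : Int)
    (h0 : 0 ≤ i) (hn : i < (dom_arr.length : Int)) (P : PySem.Dict String (List Int)) :
    pvAbody dom_arr (pvMapVals (pvG dom_arr) P) i = pvMapVals (pvG dom_arr) (pvPosBody dom_arr P i) := by
  have h2I : (2 : Int) ≤ (dom_arr.length : Int) := by exact_mod_cast h2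
  have hmain : pvMapVals (pvG dom_arr) (pvPosBody dom_arr P i)
      = (pvMapVals (pvG dom_arr) P).modify (PySem.List.pyGetD dom_arr i "") PySem.Dict.empty
          (fun inner => (pvEvStr dom_arr i).foldl (fun inner y => inner.insert y 1) inner) := by
    apply pv_mapVals_modify
    intro v
    exact pv_G_append dom_arr v i
  rw [hmain]
  simp only [pvAbody]
  by_cases hi0 : i = 0
  · subst hi0
    rw [if_pos rfl, pv_ensure_modify]
    have hev : pvEvStr dom_arr 0 = [PySem.List.pyGetD dom_arr (0 + 1) ""] := by
      simp only [pvEvStr, pvEv, List.filter]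
      rw [decide_eq_true (by omega : (0 : Int) ≤ 0 + 1 ∧ 0 + 1 < (dom_arr.length : Int)),
        decide_eq_false (by omega : ¬ ((0 : Int) ≤ 0 - 1 ∧ 0 - 1 < (dom_arr.length : Int)))]
      rfl
    rw [hev]
    rfl
  · by_cases hil : i = (dom_arr.length : Int) - 1
    · rw [if_neg hi0, if_pos hil, pv_ensure_modify]
      have hev : pvEvStr dom_arr i = [PySem.List.pyGetD dom_arr (i - 1) ""] := by
        simp only [pvEvStr, pvEv, List.filter]
        rw [decide_eq_false (by omega : ¬ ((0 : Int) ≤ i + 1 ∧ i + 1 < (dom_arr.length : Int))),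
          decide_eq_true (by omega : (0 : Int) ≤ i - 1 ∧ i - 1 < (dom_arr.length : Int))]
        rfl
      rw [hev]
      rfl
    · rw [if_neg hi0, if_neg hil, pv_ensure_modify, pv_modify_modify]
      have hev : pvEvStr dom_arr i
          = [PySem.List.pyGetD dom_arr (i + 1) "", PySem.List.pyGetD dom_arr (i - 1) ""] := by
        simp only [pvEvStr, pvEv, List.filter]
        rw [decide_eq_true (by omega : (0 : Int) ≤ i + 1 ∧ i + 1 < (dom_arr.length : Int)),
          decide_eq_true (by omega : (0 : Int) ≤ i - 1 ∧ i - 1 < (dom_arr.length : Int))]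
        rfl
      rw [hev]
      rfl

-- the whole loop simulates
theorem pv_loop (dom_arr : List String) (h2 : 2 ≤ dom_arr.length) (js : List Int)
    (hjs : ∀ j ∈ js, 0 ≤ j ∧ j < (dom_arr.length : Int)) (P : PySem.Dict String (List Int)) :
    js.foldl (pvAbody dom_arr) (pvMapVals (pvG dom_arr) P)
      = pvMapVals (pvG dom_arr) (js.foldl (pvPosBody dom_arr) P) := by
  induction js generalizing P with
  | nil => rfl
  | cons j t ih =>
    simp only [List.foldl_cons]
    rw [pv_step dom_arr h2 j (hjs j (by simp)).1 (hjs j (by simp)).2 P]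
    exact ih (fun x hx => hjs x (by simp [hx])) _

-- B's nested comprehension over a position list IS the fold over its flattened neighbour names
theorem pv_inner_eq_G (dom_arr : List String) (ps : List Int) :
    pvInner dom_arr ps = pvG dom_arr ps := by
  induction ps using List.reverseRecOn with
  | nil => rfl
  | append_singleton t p ih =>
    rw [pv_G_append]
    simp only [pvInner, List.foldl_append, List.foldl_cons, List.foldl_nil] at *
    rw [ih, pvEvStr, List.foldl_map]

-- ===== VERDICT (by name: the statement is the Claim_ definition above) =====
theorem get_domain_adjacency_dict_spec : Claim_equal_get_domain_adjacency_dict := by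
  intro dom_arr _
  show get_domain_adjacency_dict dom_arr = get_domain_adjacency_dict_alt dom_arr
  unfold get_domain_adjacency_dict get_domain_adjacency_dict_alt
  by_cases h2 : (dom_arr.length : Int) < 2
  · rw [if_pos h2, if_pos h2]
  · rw [if_neg h2, if_neg h2]
    have h2' : 2 ≤ dom_arr.length := by exact_mod_cast not_lt.mp h2
    have h0 : (PySem.Dict.empty : PySem.Dict String (PySem.Dict String Int))
        = pvMapVals (pvG dom_arr) PySem.Dict.empty := rfl
    rw [h0, pv_loop dom_arr h2' (PySem.List.pyRange 0 (dom_arr.length : Int) 1)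
      (fun j hj => by
        have := (PySem.List.mem_pyRange_one).mp hj
        exact ⟨this.1, this.2⟩) PySem.Dict.empty]
    simp only [pvMapVals, List.map_map]
    apply List.map_congr_left
    intro q _
    simp [Function.comp, pv_inner_eq_G]
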